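-- pv_equiv track=rewrite | github.com/kkuanhsin/MystanCodeProjects | stanCode_Projects/hangman_game/similarity.py | search
-- ===== SOURCE A (Python) =====
-- def search(long, short):
--     """
--     return max_part: find the most similar part of the long sequence and print.
--     """
--     a = len(long) - len(short)
--     # Times need to test
--     biggest = 0
--     max_part = ''
--     long_up = long.upper()
--     short_up = short.upper()
--
--     for i in range(a + 1):
--         part = ''
--         b = 0
--         for j in range(len(short)):
--             ch_long = long_up[i + j]
--             ch_short = short_up[j]
--             part += ch_long
--             if ch_short == ch_long:
--                 b += 1
--         if biggest <= b:
--             biggest = b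
--             max_part = part
--     return max_part
-- ===== SOURCE B (Python) =====
-- def search(long, short):
--     """
--     return max_part: find the most similar part of the long sequence and print.
--     """
--     lu = long.upper()
--     su = short.upper()
--     m = len(short)
--     k = len(long) - m + 1
--     if k <= 0:
--         return ''
--     # transposed accumulation: one pass per character of `short`, updating the
--     # match count of every alignment at once; then pick the last best alignment.
--     counts = [0] * k
--     for j, c in enumerate(su):
--         counts = [t + (lu[i + j] == c) for i, t in enumerate(counts)]
--     best = max(range(k), key=lambda i: (counts[i], i))
--     return lu[best:best + m]
-- ===== Notes on version B (the rewrite author's own statement) =====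
-- stated objective: alternative
-- what changed: Replaces the per-window rescan that rebuilds each candidate part string with a transposed accumulation (one pass per character of short updates the match count of every alignment at once), then selects the last best alignment by a keyed max and slices it out of the uppercased long.
import Mathlib
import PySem

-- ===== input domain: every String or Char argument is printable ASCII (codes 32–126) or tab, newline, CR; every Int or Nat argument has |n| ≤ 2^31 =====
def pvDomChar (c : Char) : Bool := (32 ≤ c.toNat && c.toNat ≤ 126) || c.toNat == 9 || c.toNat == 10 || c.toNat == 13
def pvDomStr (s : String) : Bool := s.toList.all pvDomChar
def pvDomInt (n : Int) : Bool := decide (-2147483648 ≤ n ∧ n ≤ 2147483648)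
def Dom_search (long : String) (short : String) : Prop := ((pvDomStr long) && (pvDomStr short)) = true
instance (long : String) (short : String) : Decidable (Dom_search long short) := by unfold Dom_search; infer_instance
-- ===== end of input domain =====

-- B replaces A's per-window rescan by a transposed accumulation over the short string
-- plus a keyed max selection (objective: alternative algorithm, same asymptotic cost).


-- ===== PORT A =====
-- literal port of A; the indexed accesses long_up[i+j] / short_up[j] are always in
-- range (i ≤ len(long)-len(short), j < len(short)), so the total form pyGetD is exact.
def search (long : String) (short : String) : String :=
  let a : Int := PySem.Str.len long - PySem.Str.len short
  let longUp := PySem.Str.upper long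
  let shortUp := PySem.Str.upper short
  let res := (PySem.List.pyRange 0 (a + 1) 1).foldl
    (fun (st : Int × List Char) i =>
      let inner := (PySem.List.pyRange 0 (PySem.Str.len short) 1).foldl
        (fun (pb : List Char × Int) j =>
          let chLong := PySem.List.pyGetD longUp.toList (i + j) ' '
          let chShort := PySem.List.pyGetD shortUp.toList j ' '
          (pb.1 ++ [chLong], if chShort = chLong then pb.2 + 1 else pb.2))
        (([] : List Char), (0 : Int))
      if st.1 ≤ inner.2 then (inner.2, inner.1) else st)
    ((0 : Int), ([] : List Char))
  String.ofList res.2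

-- ===== PORT B =====
-- literal port of Source B; lu[i+j] is always in range inside the loop, so pyGetD is exact.
def search_alt (long : String) (short : String) : String :=
  let lu := PySem.Str.upper long
  let su := PySem.Str.upper short
  let m : Int := PySem.Str.len short
  let k : Int := PySem.Str.len long - m + 1
  if k ≤ 0 then "" else
    let counts : List Int := (PySem.List.enumerate su.toList 0).foldl
      (fun (acc : List Int) (jc : Int × Char) =>
        (PySem.List.enumerate acc 0).map
          (fun it => it.2 + if PySem.List.pyGetD lu.toList (it.1 + jc.1) ' ' = jc.2 then 1 else 0))
      (List.replicate k.toNat 0)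
    -- max(range(k), key=lambda i: (counts[i], i)): range(k) is nonempty here, so getD's
    -- default is never used
    let best := (PySem.List.max2? (PySem.List.pyRange 0 k 1)
        (fun i => PySem.List.pyGetD counts i 0) (fun i => i)).getD 0
    String.ofList (PySem.List.slice lu.toList (some best) (some (best + m)))

-- ===== PRECONDITION & SPEC =====
def Spec_search (long : String) (short : String) (out : String) : Prop := out = search_alt long short
instance (long : String) (short : String) (out : String) : Decidable (Spec_search long short out) := by unfold Spec_search; infer_instance

-- ===== CLAIM (what is proved, stated in full; the proofs are below) =====
def Claim_equal_search : Prop := ∀ (long : String) (short : String), Dom_search long short → Spec_search long short (search long short)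

-- ===== LEMMAS AND PROOFS =====

def pvPart (L : List Char) (i : Int) (t : Nat) : List Char :=
  (List.range t).map (fun (j : Nat) => PySem.List.pyGetD L (i + (j : Int)) ' ')

def pvCnt (L S : List Char) (i : Int) (t : Nat) : Int :=
  ((List.range t).countP
    (fun (j : Nat) => PySem.List.pyGetD S (j : Int) ' ' == PySem.List.pyGetD L (i + (j : Int)) ' ') : Int)

lemma pvPart_succ (L : List Char) (i : Int) (t : Nat) :
    pvPart L i (t + 1) = pvPart L i t ++ [PySem.List.pyGetD L (i + (t : Int)) ' '] := by
  simp [pvPart, List.range_succ]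

lemma pvCnt_succ (L S : List Char) (i : Int) (t : Nat) :
    pvCnt L S i (t + 1) = pvCnt L S i t +
      (if PySem.List.pyGetD S (t : Int) ' ' = PySem.List.pyGetD L (i + (t : Int)) ' '
       then 1 else 0) := by
  simp only [pvCnt, List.range_succ, List.countP_append, List.countP_cons, List.countP_nil,
    beq_iff_eq]
  split_ifs <;> push_cast <;> ring

-- A's inner loop builds the window and its match count
lemma pvInner (L S : List Char) (i : Int) (t : Nat) :
    (PySem.List.pyRange 0 (t : Int) 1).foldl
      (fun (pb : List Char × Int) j =>
        (pb.1 ++ [PySem.List.pyGetD L (i + j) ' '],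
         if PySem.List.pyGetD S j ' ' = PySem.List.pyGetD L (i + j) ' ' then pb.2 + 1 else pb.2))
      (([] : List Char), (0 : Int))
    = (pvPart L i t, pvCnt L S i t) := by
  induction t with
  | zero => simp [PySem.List.pyRange_one_eq_nil, pvPart, pvCnt]
  | succ t ih =>
    have hc : ((t + 1 : Nat) : Int) = (t : Int) + 1 := by push_cast; ring
    rw [hc, PySem.List.pyRange_one_succ_right (by positivity), List.foldl_append, ih,
      pvPart_succ, pvCnt_succ]
    simp only [List.foldl_cons, List.foldl_nil]
    split_ifs <;> simp

-- match count of alignment i against the characters of S' placed at offsets s, s+1, …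
def pvCntFrom (L : List Char) : Int → List Char → Int → Int
  | _, [], _ => 0
  | s, c :: r, i =>
      (if PySem.List.pyGetD L (i + s) ' ' = c then 1 else 0) + pvCntFrom L (s + 1) r i

lemma pvEnumMapRange {β γ : Type} (h : Int → β → γ) :
    ∀ (K : Nat) (g : Nat → β) (s : Int),
      (PySem.List.enumerate ((List.range K).map g) s).map (fun it => h it.1 it.2)
        = (List.range K).map (fun (i : Nat) => h (s + (i : Int)) (g i)) := by
  intro K
  induction K with
  | zero => intro g s; simp
  | succ K ih =>
    intro g s
    rw [List.range_succ_eq_map, List.map_cons, PySem.List.enumerate_cons, List.map_cons,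
      List.map_map, ih (g ∘ Nat.succ) (s + 1), List.map_cons, List.map_map]
    refine congrArg₂ _ (by simp) ?_
    apply List.map_congr_left
    intro i _
    simp only [Function.comp_apply]
    push_cast
    ring_nf

lemma pvCounts (L : List Char) (K : Nat) :
    ∀ (S' : List Char) (s : Int) (g : Nat → Int),
      (PySem.List.enumerate S' s).foldl
        (fun (acc : List Int) (jc : Int × Char) =>
          (PySem.List.enumerate acc 0).map
            (fun it => it.2 + if PySem.List.pyGetD L (it.1 + jc.1) ' ' = jc.2 then 1 else 0))
        ((List.range K).map g)
      = (List.range K).map (fun (i : Nat) => g i + pvCntFrom L s S' (i : Int)) := by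
  intro S'
  induction S' with
  | nil => intro s g; simp [PySem.List.enumerate, pvCntFrom]
  | cons c r ih =>
    intro s g
    rw [PySem.List.enumerate_cons, List.foldl_cons,
      pvEnumMapRange (fun i t => t + if PySem.List.pyGetD L (i + s) ' ' = c then 1 else 0) K g 0,
      ih (s + 1)]
    apply List.map_congr_left
    intro i _
    simp [pvCntFrom]
    ring

lemma pvCntFrom_eq (L : List Char) :
    ∀ (S' : List Char) (s i : Int),
      pvCntFrom L s S' i
        = ((List.range S'.length).countP
            (fun (j : Nat) => PySem.List.pyGetD S' (j : Int) ' '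
              == PySem.List.pyGetD L (i + s + (j : Int)) ' ') : Int) := by
  intro S'
  induction S' with
  | nil => intro s i; simp [pvCntFrom]
  | cons c r ih =>
    intro s i
    rw [pvCntFrom, ih (s + 1) i, List.length_cons, List.range_succ_eq_map, List.countP_cons,
      List.countP_map]
    have hpred : ((fun (j : Nat) => PySem.List.pyGetD (c :: r) (j : Int) ' '
          == PySem.List.pyGetD L (i + s + (j : Int)) ' ') ∘ Nat.succ)
        = (fun (j : Nat) => PySem.List.pyGetD r (j : Int) ' '
          == PySem.List.pyGetD L (i + (s + 1) + (j : Int)) ' ') := by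
      funext j
      simp only [Function.comp_apply, PySem.List.pyGetD_natCast]
      have h1 : ((Nat.succ j : Nat) : Int) = (j : Int) + 1 := by push_cast; ring
      rw [h1]
      have h2 : i + s + ((j : Int) + 1) = i + (s + 1) + (j : Int) := by ring
      rw [h2]
      rfl
    rw [hpred]
    have hp0 : (PySem.List.pyGetD (c :: r) ((0 : Nat) : Int) ' '
        == PySem.List.pyGetD L (i + s + ((0 : Nat) : Int)) ' ')
        = (PySem.List.pyGetD L (i + s) ' ' == c) := by
      by_cases h : c = PySem.List.pyGetD L (i + s) ' ' <;> simp [h, eq_comm]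
    rw [hp0]
    push_cast
    by_cases h : PySem.List.pyGetD L (i + s) ' ' = c
    · simp [h]
      ring
    · simp [h]

lemma pvSlice (L : List Char) (i : Int) (m : Nat) (h0 : 0 ≤ i) (hm : i.toNat + m ≤ L.length) :
    PySem.List.slice L (some i) (some (i + (m : Int))) = pvPart L i m := by
  rw [PySem.List.slice_toNat L h0 (by omega)]
  apply List.ext_getElem
  · simp [pvPart]; omega
  · intro k h1 h2
    have hk : k < m := by simp [pvPart] at h2; omega
    simp only [List.getElem_take, List.getElem_drop, pvPart, List.getElem_map,
      List.getElem_range]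
    rw [PySem.List.pyGetD_eq_getElem L ' ' (by omega) (by omega)]
    congr 1
    omega

lemma pvSel (cA cB : Int → Int) (w : Int → List Char) :
    ∀ (K : Nat), 1 ≤ K →
      (∀ x : Int, 0 ≤ x → x < (K : Int) → cA x = cB x ∧ 0 ≤ cA x) →
      ∃ j : Int, 0 ≤ j ∧ j < (K : Int) ∧
        PySem.List.max2? (PySem.List.pyRange 0 (K : Int) 1) cB (fun i => i) = some j ∧
        (PySem.List.pyRange 0 (K : Int) 1).foldl
          (fun (st : Int × List Char) i => if st.1 ≤ cA i then (cA i, w i) else st)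
          ((0 : Int), ([] : List Char)) = (cA j, w j) := by
  intro K
  induction K with
  | zero => omega
  | succ K ih =>
    intro _ hag
    by_cases hK : K = 0
    · subst hK
      refine ⟨0, le_refl _, by norm_num, ?_, ?_⟩
      · have h01 : PySem.List.pyRange 0 ((1 : Nat) : Int) 1 = [0] := by decide
        rw [h01]
        simp [PySem.List.max2?]
      · have h01 : PySem.List.pyRange 0 ((1 : Nat) : Int) 1 = [0] := by decide
        rw [h01]
        have := (hag 0 (le_refl _) (by norm_num)).2
        simp [List.foldl_cons, if_pos this]
    · have hK1 : 1 ≤ K := by omega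
      obtain ⟨j, hj0, hjK, hmax, hfold⟩ := ih hK1 (fun x hx hxK => hag x hx (by push_cast at *; omega))
      have hcast : ((K + 1 : Nat) : Int) = (K : Int) + 1 := by push_cast; ring
      have hsplit : PySem.List.pyRange 0 ((K + 1 : Nat) : Int) 1
          = PySem.List.pyRange 0 (K : Int) 1 ++ [(K : Int)] := by
        rw [hcast, PySem.List.pyRange_one_succ_right (by positivity)]
      have hAj := hag j hj0 (by push_cast; omega)
      have hAK := hag (K : Int) (by positivity) (by push_cast; omega)
      rw [hsplit]
      simp only [PySem.List.max2?] at hmax ⊢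
      rw [List.foldl_append, List.foldl_append, hmax, hfold]
      simp only [List.foldl_cons, List.foldl_nil]
      by_cases h : cA j ≤ cA (K : Int)
      · refine ⟨(K : Int), by positivity, by push_cast; omega, ?_, ?_⟩
        · rw [if_pos]
          have hle : cB j ≤ cB (K : Int) := by rw [← hAj.1, ← hAK.1]; exact h
          by_cases hlt : cB j < cB (K : Int)
          · simp [hlt]
          · simp [hlt, hjK, show ¬ cB (K : Int) < cB j by omega]
        · rw [if_pos h]
      · refine ⟨j, hj0, by push_cast; omega, ?_, ?_⟩
        · rw [if_neg]
          have hlt : cB (K : Int) < cB j := by rw [← hAj.1, ← hAK.1]; omega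
          simp [hlt, show ¬ cB j < cB (K : Int) by omega]
        · rw [if_neg h]

set_option maxHeartbeats 2000000 in
theorem main_eq (long short : String) : search long short = search_alt long short := by
  simp only [search, search_alt, PySem.Str.len_eq]
  set L := (PySem.Str.upper long).toList with hLdef
  set S := (PySem.Str.upper short).toList with hSdef
  have hL : L.length = long.toList.length := by
    simp [hLdef, PySem.Str.toList_upper, PySem.Chars.upper]
  have hS : S.length = short.toList.length := by
    simp [hSdef, PySem.Str.toList_upper, PySem.Chars.upper]
  set n := long.toList.length
  set m := short.toList.length
  by_cases hk : (n : Int) - (m : Int) + 1 ≤ 0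
  · have hnil : PySem.List.pyRange 0 ((n : Int) - (m : Int) + 1) 1 = [] :=
      PySem.List.pyRange_one_eq_nil (by omega)
    rw [if_pos hk, hnil]
    simp
  · rw [if_neg hk]
    set K : Nat := n - m + 1 with hKdef
    have hmn : m ≤ n := by omega
    have hKi : ((K : Nat) : Int) = (n : Int) - (m : Int) + 1 := by
      simp only [hKdef]; omega
    have hK1 : 1 ≤ K := by omega
    have hrep : List.replicate ((n : Int) - (m : Int) + 1).toNat (0 : Int)
        = (List.range K).map (fun _ => (0 : Int)) := by
      rw [List.map_const', List.length_range]
      congr 1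
      omega
    rw [hrep, pvCounts L K S 0 (fun _ => (0 : Int))]
    have hagree : ∀ x : Int, 0 ≤ x → x < (K : Int) →
        pvCnt L S x m
          = PySem.List.pyGetD ((List.range K).map (fun (i : Nat) => 0 + pvCntFrom L 0 S (i : Int))) x 0
        ∧ 0 ≤ pvCnt L S x m := by
      intro x hx0 hxK
      refine ⟨?_, by unfold pvCnt; positivity⟩
      rw [PySem.List.pyGetD_eq_getElem _ 0 hx0 (by simp; omega)]
      simp only [List.getElem_map, List.getElem_range]
      rw [zero_add, pvCntFrom_eq]
      have hx : ((x.toNat : Nat) : Int) = x := by omega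
      rw [hx, hS]
      unfold pvCnt
      congr 1
      apply List.countP_congr
      intro a _
      rw [add_zero]
    obtain ⟨j, hj0, hjK, hmax, hfold⟩ :=
      pvSel (fun i => pvCnt L S i m)
        (fun i => PySem.List.pyGetD ((List.range K).map (fun (i : Nat) => 0 + pvCntFrom L 0 S (i : Int))) i 0)
        (fun i => pvPart L i m) K hK1 (fun x hx hxK => hagree x hx hxK)
    rw [← hKi]
    simp only [pvInner]
    rw [hfold, hmax]
    simp only [Option.getD_some]
    rw [pvSlice L j m hj0 (by omega)]

-- ===== VERDICT (by name: the statement is the Claim_ definition above) =====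
theorem search_spec : Claim_equal_search := by
  intro long short _
  unfold Spec_search
  exact main_eq long short
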